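-- pv_equiv track=rewrite | github.com/morgen52/llm_preference | tools/cluster.py | find_common_cluster
-- ===== SOURCE A (Python) =====
-- from typing import List, Dict, Set
--
-- def find_common_cluster(assignA: List[str], assignB: List[int]) -> List[List[int]]:
--     strong_connection_graph = {}
--     weak_connection_graph = {}
--
--     for i in range(len(assignA)):
--         for j in range(i+1, len(assignA)):
--             connection = (assignA[i]==assignA[j]) + (assignB[i]==assignB[j])
--             if connection == 2:
--                 if i not in strong_connection_graph:
--                     strong_connection_graph[i] = []
--                 strong_connection_graph[i].append(j)
--             elif connection == 1:
--                 if i not in weak_connection_graph: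
--                     weak_connection_graph[i] = []
--                 weak_connection_graph[i].append(j)
--     clusters = []
--     for i in strong_connection_graph:
--         cluster = [i] + strong_connection_graph[i]
--         clusters.append(cluster)
--
--     if len(clusters) == 0:
--         for i in weak_connection_graph:
--             cluster = [i] + weak_connection_graph[i]
--             clusters.append(cluster)
--
--     return clusters, [assignA[i[0]] for i in clusters], [assignB[i[0]] for i in clusters]
-- ===== SOURCE B (Python) =====
-- def find_common_cluster(assignA, assignB):
--     n = len(assignA)
--     groups = {}
--     for i in range(n):
--         groups.setdefault((assignA[i], assignB[i]), []).append(i)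
--     clusters = []
--     for g in groups.values():
--         for k in range(len(g) - 1):
--             clusters.append(g[k:])
--     clusters.sort(key=lambda c: c[0])
--     if not clusters:
--         for i in range(n):
--             tail = [j for j in range(i + 1, n)
--                     if (assignA[j] == assignA[i]) != (assignB[j] == assignB[i])]
--             if tail:
--                 clusters.append([i] + tail)
--     return clusters, [assignA[c[0]] for c in clusters], [assignB[c[0]] for c in clusters]
-- ===== Notes on version B (the rewrite author's own statement) =====
-- stated objective: faster
-- what changed: B replaces A's O(n^2) all-pairs scan that accumulates per-index adjacency dicts by a single group-by pass: indices are bucketed by their (assignA[i], assignB[i]) pair in one dict, each strong cluster is read off as a suffix of a bucket and the clusters are sorted by head index; the weak fallback is computed directly per head only when no strong pair exists.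
-- outside the precondition, e.g. on find_common_cluster(['x'], []): A returns ([], [], []), B raises IndexError
import Mathlib
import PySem

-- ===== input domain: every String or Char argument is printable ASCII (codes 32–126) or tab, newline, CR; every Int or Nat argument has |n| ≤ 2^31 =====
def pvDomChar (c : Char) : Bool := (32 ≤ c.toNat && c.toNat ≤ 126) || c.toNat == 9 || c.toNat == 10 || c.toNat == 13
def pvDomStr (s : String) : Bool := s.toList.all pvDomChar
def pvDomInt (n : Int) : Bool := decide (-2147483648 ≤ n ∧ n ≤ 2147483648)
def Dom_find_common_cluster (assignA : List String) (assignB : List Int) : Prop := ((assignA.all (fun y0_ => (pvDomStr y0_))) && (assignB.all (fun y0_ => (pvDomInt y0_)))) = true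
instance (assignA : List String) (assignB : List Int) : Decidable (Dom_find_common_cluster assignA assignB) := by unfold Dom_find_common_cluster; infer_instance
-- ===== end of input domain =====

-- B groups indices by their (assignA[i], assignB[i]) pair in one dict pass and reads strong
-- clusters off as bucket suffixes sorted by head, instead of A's all-pairs adjacency scan.


-- ===== PORT A =====
def find_common_cluster (assignA : List String) (assignB : List Int) : List (List Int) × List String × List Int :=
  let n : Int := (assignA.length : Int)
  let dicts :=
    (PySem.List.pyRange 0 n 1).foldl
      (fun (st : PySem.Dict Int (List Int) × PySem.Dict Int (List Int)) i =>
        (PySem.List.pyRange (i+1) n 1).foldl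
          (fun (st : PySem.Dict Int (List Int) × PySem.Dict Int (List Int)) j =>
            let connection : Int :=
              (if PySem.List.pyGetD assignA i "" == PySem.List.pyGetD assignA j "" then 1 else 0) +
              (if PySem.List.pyGetD assignB i 0 == PySem.List.pyGetD assignB j 0 then 1 else 0)
            if connection == 2 then
              let s := if st.1.contains i then st.1 else st.1.insert i ([] : List Int)
              (s.modify i [] (fun l => l ++ [j]), st.2)
            else if connection == 1 then
              let w := if st.2.contains i then st.2 else st.2.insert i ([] : List Int)
              (st.1, w.modify i [] (fun l => l ++ [j]))
            else st) st)
      (PySem.Dict.empty, PySem.Dict.empty)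
  let clusters :=
    dicts.1.keys.foldl (fun acc i => acc ++ [i :: dicts.1.getD i []]) ([] : List (List Int))
  let clusters :=
    if clusters.length == 0 then
      dicts.2.keys.foldl (fun acc i => acc ++ [i :: dicts.2.getD i []]) clusters
    else clusters
  (clusters,
   clusters.map (fun c => PySem.List.pyGetD assignA (PySem.List.pyGetD c 0 0) ""),
   clusters.map (fun c => PySem.List.pyGetD assignB (PySem.List.pyGetD c 0 0) 0))

-- ===== PORT B =====
def find_common_cluster_alt (assignA : List String) (assignB : List Int) : List (List Int) × List String × List Int :=
  let n : Int := (assignA.length : Int)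
  let groups :=
    (PySem.List.pyRange 0 n 1).foldl
      (fun (d : PySem.Dict (String × Int) (List Int)) i =>
        d.modify (PySem.List.pyGetD assignA i "", PySem.List.pyGetD assignB i 0) []
          (fun l => l ++ [i]))
      PySem.Dict.empty
  let clusters :=
    groups.values.foldl
      (fun acc g =>
        (PySem.List.pyRange 0 ((g.length : Int) - 1) 1).foldl
          (fun acc k => acc ++ [PySem.List.slice g (some k) none]) acc)
      ([] : List (List Int))
  let clusters := PySem.List.sorted clusters (fun c => PySem.List.pyGetD c 0 0) false
  let clusters :=
    if clusters.length == 0 then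
      (PySem.List.pyRange 0 n 1).foldl
        (fun acc i =>
          let tail := (PySem.List.pyRange (i+1) n 1).filter
            (fun j => ((PySem.List.pyGetD assignA j "" == PySem.List.pyGetD assignA i "")
                       != (PySem.List.pyGetD assignB j 0 == PySem.List.pyGetD assignB i 0)))
          if tail.isEmpty then acc else acc ++ [i :: tail]) clusters
    else clusters
  (clusters,
   clusters.map (fun c => PySem.List.pyGetD assignA (PySem.List.pyGetD c 0 0) ""),
   clusters.map (fun c => PySem.List.pyGetD assignB (PySem.List.pyGetD c 0 0) 0))

-- ===== PRECONDITION & SPEC =====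
-- Pre_ excludes inputs with len(assignB) < len(assignA): on those the Python A raises
-- IndexError except in the degenerate case len(assignA) ≤ 1, where A happens to return
-- ([], [], []) while B (which reads assignB[i] for every i) raises IndexError.
def Pre_find_common_cluster (assignA : List String) (assignB : List Int) : Prop :=
  assignA.length ≤ assignB.length
instance (assignA : List String) (assignB : List Int) : Decidable (Pre_find_common_cluster assignA assignB) := by unfold Pre_find_common_cluster; infer_instance

def pvWitness_find_common_cluster : List String × List Int := (["x", "y", "x"], [1, 2, 1])

def Spec_find_common_cluster (assignA : List String) (assignB : List Int) (out : List (List Int) × List String × List Int) : Prop := out = find_common_cluster_alt assignA assignB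
instance (assignA : List String) (assignB : List Int) (out : List (List Int) × List String × List Int) : Decidable (Spec_find_common_cluster assignA assignB out) := by unfold Spec_find_common_cluster; infer_instance

-- ===== CLAIM (what is proved, stated in full; the proofs are below) =====
def Claim_equal_find_common_cluster : Prop := ∀ (assignA : List String) (assignB : List Int), Dom_find_common_cluster assignA assignB → Pre_find_common_cluster assignA assignB → Spec_find_common_cluster assignA assignB (find_common_cluster assignA assignB)

-- ===== LEMMAS AND PROOFS =====

-- Canonical description shared by both ports.
def fccStrong (assignA : List String) (assignB : List Int) (i j : Int) : Bool :=
  (PySem.List.pyGetD assignA i "" == PySem.List.pyGetD assignA j "") &&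
  (PySem.List.pyGetD assignB i 0 == PySem.List.pyGetD assignB j 0)

def fccWeak (assignA : List String) (assignB : List Int) (i j : Int) : Bool :=
  (PySem.List.pyGetD assignA i "" == PySem.List.pyGetD assignA j "") !=
  (PySem.List.pyGetD assignB i 0 == PySem.List.pyGetD assignB j 0)

def fccS (assignA : List String) (assignB : List Int) (i : Int) : List Int :=
  (PySem.List.pyRange (i+1) (assignA.length : Int) 1).filter (fccStrong assignA assignB i)

def fccW (assignA : List String) (assignB : List Int) (i : Int) : List Int :=
  (PySem.List.pyRange (i+1) (assignA.length : Int) 1).filter (fccWeak assignA assignB i)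

def fccCanonS (assignA : List String) (assignB : List Int) : List (List Int) :=
  ((PySem.List.pyRange 0 (assignA.length : Int) 1).filter
      (fun i => !(fccS assignA assignB i).isEmpty)).map (fun i => i :: fccS assignA assignB i)

def fccCanonW (assignA : List String) (assignB : List Int) : List (List Int) :=
  ((PySem.List.pyRange 0 (assignA.length : Int) 1).filter
      (fun i => !(fccW assignA assignB i).isEmpty)).map (fun i => i :: fccW assignA assignB i)

def fccClusters (assignA : List String) (assignB : List Int) : List (List Int) :=
  if (fccCanonS assignA assignB).length == 0 then fccCanonW assignA assignB
  else fccCanonS assignA assignB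

def fccOut (assignA : List String) (assignB : List Int) : List (List Int) × List String × List Int :=
  (fccClusters assignA assignB,
   (fccClusters assignA assignB).map (fun c => PySem.List.pyGetD assignA (PySem.List.pyGetD c 0 0) ""),
   (fccClusters assignA assignB).map (fun c => PySem.List.pyGetD assignB (PySem.List.pyGetD c 0 0) 0))

def fccItemsOf (f : Int → List Int) (is : List Int) : List (Int × List Int) :=
  is.flatMap (fun i => if (f i).isEmpty then [] else [(i, f i)])

lemma fcc_get?_last (i : Int) (acc : List Int) :
    ∀ (d0 : List (Int × List Int)), (∀ p ∈ d0, p.1 ≠ i) →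
      (PySem.Dict.mk (d0 ++ [(i, acc)]) : PySem.Dict Int (List Int)).get? i = some acc := by
  intro d0
  induction d0 with
  | nil =>
    intro _
    rw [List.nil_append, PySem.Dict.get?_mk_cons]
    simp
  | cons q t ih =>
    intro h
    obtain ⟨k, v⟩ := q
    rw [List.cons_append, PySem.Dict.get?_mk_cons]
    have hk : (k == i) = false := beq_eq_false_iff_ne.mpr (h (k, v) (by simp))
    rw [hk]
    simp only [Bool.false_eq_true, if_false]
    exact ih (fun p hp => h p (List.mem_cons_of_mem _ hp))


lemma fcc_contains_last (i : Int) (acc : List Int) (d0 : List (Int × List Int)) :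
    (PySem.Dict.mk (d0 ++ [(i, acc)]) : PySem.Dict Int (List Int)).contains i = true := by
  simp [PySem.Dict.contains]

lemma fcc_contains_not (i : Int) (d0 : List (Int × List Int)) (h : ∀ p ∈ d0, p.1 ≠ i) :
    (PySem.Dict.mk d0 : PySem.Dict Int (List Int)).contains i = false := by
  simp only [PySem.Dict.contains, List.any_eq_false]
  intro p hp
  simp [beq_eq_false_iff_ne.mpr (h p hp)]

lemma fcc_modify_at (i j : Int) (acc : List Int) (d0 : List (Int × List Int))
    (h : ∀ p ∈ d0, p.1 ≠ i) :
    (PySem.Dict.mk (d0 ++ [(i, acc)]) : PySem.Dict Int (List Int)).modify i []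
        (fun t => t ++ [j])
      = PySem.Dict.mk (d0 ++ [(i, acc ++ [j])]) := by
  have hg : (PySem.Dict.mk (d0 ++ [(i, acc)]) : PySem.Dict Int (List Int)).getD i [] = acc := by
    rw [PySem.Dict.getD_eq_get?_getD, fcc_get?_last i acc d0 h]
    rfl
  rw [PySem.Dict.modify, hg, PySem.Dict.insert, if_pos (fcc_contains_last i acc d0)]
  congr 1
  rw [List.map_append]
  congr 1
  · calc d0.map (fun p => if (p.1 == i) = true then (i, acc ++ [j]) else p)
        = d0.map id := List.map_congr_left (fun p hp => by
          simp [beq_eq_false_iff_ne.mpr (h p hp)])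
      _ = d0 := List.map_id d0
  · simp

lemma fcc_step_run (i : Int) (l : List Int) :
    ∀ (acc : List Int) (d0 : List (Int × List Int)), (∀ p ∈ d0, p.1 ≠ i) →
      l.foldl (fun d j => (if d.contains i then d else d.insert i ([] : List Int)).modify i []
                  (fun t => t ++ [j]))
          (PySem.Dict.mk (d0 ++ [(i, acc)]))
        = PySem.Dict.mk (d0 ++ [(i, acc ++ l)]) := by
  induction l with
  | nil => intro acc d0 _; simp
  | cons j t ih =>
    intro acc d0 h
    rw [List.foldl_cons, if_pos (fcc_contains_last i acc d0), fcc_modify_at i j acc d0 h,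
      ih (acc ++ [j]) d0 h, List.append_assoc]
    rfl


lemma fcc_accum (P : Int → Bool) (i : Int) (js : List Int) (d0 : List (Int × List Int))
    (h : ∀ p ∈ d0, p.1 ≠ i) :
    js.foldl (fun d j => if P j then (if d.contains i then d else d.insert i ([] : List Int)).modify i []
                  (fun t => t ++ [j]) else d)
        (PySem.Dict.mk d0)
      = PySem.Dict.mk (d0 ++ if (js.filter P).isEmpty then [] else [(i, js.filter P)]) := by
  rw [PySem.List.foldl_if_eq_foldl_filter]
  cases hf : js.filter P with
  | nil => simp
  | cons j t =>
    rw [List.foldl_cons]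
    have hstep : (if (PySem.Dict.mk d0 : PySem.Dict Int (List Int)).contains i
          then (PySem.Dict.mk d0 : PySem.Dict Int (List Int))
          else (PySem.Dict.mk d0 : PySem.Dict Int (List Int)).insert i ([] : List Int)).modify i []
            (fun t => t ++ [j])
        = PySem.Dict.mk (d0 ++ [(i, [j])]) := by
      rw [if_neg (by simp [fcc_contains_not i d0 h]), PySem.Dict.insert,
        if_neg (by simp [fcc_contains_not i d0 h])]
      exact fcc_modify_at i j [] d0 h
    rw [hstep, fcc_step_run i t [j] d0 h]
    simp


lemma fcc_body_split (assignA : List String) (assignB : List Int) (i : Int) :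
    (fun (st : PySem.Dict Int (List Int) × PySem.Dict Int (List Int)) (j : Int) =>
        let connection : Int :=
          (if PySem.List.pyGetD assignA i "" == PySem.List.pyGetD assignA j "" then 1 else 0) +
          (if PySem.List.pyGetD assignB i 0 == PySem.List.pyGetD assignB j 0 then 1 else 0)
        if connection == 2 then
          let s := if st.1.contains i then st.1 else st.1.insert i ([] : List Int)
          (s.modify i [] (fun l => l ++ [j]), st.2)
        else if connection == 1 then
          let w := if st.2.contains i then st.2 else st.2.insert i ([] : List Int)
          (st.1, w.modify i [] (fun l => l ++ [j]))
        else st)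
      = (fun st j =>
          (if fccStrong assignA assignB i j then
              (if st.1.contains i then st.1 else st.1.insert i ([] : List Int)).modify i [] (fun t => t ++ [j])
            else st.1,
           if fccWeak assignA assignB i j then
              (if st.2.contains i then st.2 else st.2.insert i ([] : List Int)).modify i [] (fun t => t ++ [j])
            else st.2)) := by
  funext st j
  simp only [fccStrong, fccWeak]
  rcases Bool.eq_false_or_eq_true
      (PySem.List.pyGetD assignA i "" == PySem.List.pyGetD assignA j "") with h1 | h1 <;>
    rcases Bool.eq_false_or_eq_true
      (PySem.List.pyGetD assignB i 0 == PySem.List.pyGetD assignB j 0) with h2 | h2 <;>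
      simp only [h1, h2] <;> simp


lemma fcc_outer (assignA : List String) (assignB : List Int) :
    ∀ (is : List Int), is.Nodup →
      ∀ (ds0 dw0 : List (Int × List Int)),
        (∀ p ∈ ds0, p.1 ∉ is) → (∀ p ∈ dw0, p.1 ∉ is) →
        is.foldl
            (fun (st : PySem.Dict Int (List Int) × PySem.Dict Int (List Int)) i =>
              (PySem.List.pyRange (i+1) (assignA.length : Int) 1).foldl
                (fun (st : PySem.Dict Int (List Int) × PySem.Dict Int (List Int)) j =>
                  let connection : Int :=
                    (if PySem.List.pyGetD assignA i "" == PySem.List.pyGetD assignA j "" then 1 else 0) +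
                    (if PySem.List.pyGetD assignB i 0 == PySem.List.pyGetD assignB j 0 then 1 else 0)
                  if connection == 2 then
                    let s := if st.1.contains i then st.1 else st.1.insert i ([] : List Int)
                    (s.modify i [] (fun l => l ++ [j]), st.2)
                  else if connection == 1 then
                    let w := if st.2.contains i then st.2 else st.2.insert i ([] : List Int)
                    (st.1, w.modify i [] (fun l => l ++ [j]))
                  else st) st)
            (PySem.Dict.mk ds0, PySem.Dict.mk dw0)
          = (PySem.Dict.mk (ds0 ++ fccItemsOf (fccS assignA assignB) is),
             PySem.Dict.mk (dw0 ++ fccItemsOf (fccW assignA assignB) is)) := by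
  intro is
  induction is with
  | nil =>
    intro _ ds0 dw0 _ _
    simp [fccItemsOf]
  | cons i rest ih =>
    intro hnd ds0 dw0 hs hw
    obtain ⟨hni, hndr⟩ := List.nodup_cons.mp hnd
    have hds : ∀ p ∈ ds0, p.1 ≠ i := fun p hp he =>
      hs p hp (he ▸ List.mem_cons_self ..)
    have hdw : ∀ p ∈ dw0, p.1 ≠ i := fun p hp he =>
      hw p hp (he ▸ List.mem_cons_self ..)
    simp only [List.foldl_cons]
    rw [fcc_body_split assignA assignB i,
      PySem.List.foldl_prod_mk
        (f := fun (d : PySem.Dict Int (List Int)) (j : Int) => if fccStrong assignA assignB i j then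
            (if d.contains i then d else d.insert i ([] : List Int)).modify i [] (fun t => t ++ [j])
          else d)
        (g := fun (d : PySem.Dict Int (List Int)) (j : Int) => if fccWeak assignA assignB i j then
            (if d.contains i then d else d.insert i ([] : List Int)).modify i [] (fun t => t ++ [j])
          else d),
      fcc_accum (fccStrong assignA assignB i) i _ ds0 hds,
      fcc_accum (fccWeak assignA assignB i) i _ dw0 hdw]
    have hsub : ∀ (f : Int → List Int) (d0 : List (Int × List Int)),
        (∀ p ∈ d0, p.1 ∉ i :: rest) →
        (∀ p ∈ d0 ++ if (f i).isEmpty then [] else [(i, f i)], p.1 ∉ rest) := by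
      intro f d0 hd0 p hp
      rcases List.mem_append.mp hp with hmem | hmem
      · exact fun hin => hd0 p hmem (List.mem_cons_of_mem _ hin)
      · have hpi : p.1 = i := by
          by_cases hc : (f i).isEmpty
          · rw [if_pos hc] at hmem; exact absurd hmem (List.not_mem_nil)
          · rw [if_neg hc] at hmem
            rcases List.mem_singleton.mp hmem with rfl
            rfl
        exact fun hin => hni (hpi ▸ hin)
    rw [ih hndr _ _
      (by
        have := hsub (fun k => ((PySem.List.pyRange (k+1) (assignA.length : Int) 1).filter
          (fccStrong assignA assignB k))) ds0 hs
        simpa using this)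
      (by
        have := hsub (fun k => ((PySem.List.pyRange (k+1) (assignA.length : Int) 1).filter
          (fccWeak assignA assignB k))) dw0 hw
        simpa using this)]
    simp [fccItemsOf, fccS, fccW, List.append_assoc]


lemma fcc_itemsOf_map_fst (f : Int → List Int) (is : List Int) :
    (fccItemsOf f is).map Prod.fst = is.filter (fun i => !(f i).isEmpty) := by
  induction is with
  | nil => rfl
  | cons i t ih =>
    have hstep : fccItemsOf f (i :: t)
        = (if (f i).isEmpty then [] else [(i, f i)]) ++ fccItemsOf f t := by
      simp [fccItemsOf]
    rw [hstep, List.map_append, ih, List.filter_cons]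
    cases h : (f i).isEmpty
    · simp
    · simp


lemma fcc_mem_itemsOf (f : Int → List Int) (is : List Int) (i : Int)
    (hi : i ∈ is) (hne : (f i).isEmpty = false) : (i, f i) ∈ fccItemsOf f is := by
  simp only [fccItemsOf, List.mem_flatMap]
  exact ⟨i, hi, by simp [hne]⟩


lemma fcc_clusters_of_items (f : Int → List Int) (is : List Int) (hnd : is.Nodup)
    (d : PySem.Dict Int (List Int)) (hd : d = PySem.Dict.mk (fccItemsOf f is)) :
    d.keys.foldl (fun acc i => acc ++ [i :: d.getD i []]) ([] : List (List Int))
      = (is.filter (fun i => !(f i).isEmpty)).map (fun i => i :: f i) := by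
  have hkeys : d.keys = is.filter (fun i => !(f i).isEmpty) := by
    rw [hd]
    show (fccItemsOf f is).map Prod.fst = _
    exact fcc_itemsOf_map_fst f is
  rw [PySem.List.foldl_append_singleton_eq_map, List.nil_append, hkeys]
  apply List.map_congr_left
  intro i hi
  have hne : (f i).isEmpty = false := by
    have := List.of_mem_filter hi
    simpa using this
  have hmem : (i, f i) ∈ d.items := by
    rw [hd]
    exact fcc_mem_itemsOf f is i (List.mem_of_mem_filter hi) hne
  have hnodup : d.keys.Nodup := by rw [hkeys]; exact hnd.filter _
  rw [PySem.Dict.getD_of_mem_items d hmem hnodup]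


lemma fcc_A_eq (assignA : List String) (assignB : List Int) :
    find_common_cluster assignA assignB = fccOut assignA assignB := by
  have houter := fcc_outer assignA assignB (PySem.List.pyRange 0 (assignA.length : Int) 1)
      (PySem.List.nodup_pyRange_one 0 _) [] [] (by simp) (by simp)
  unfold find_common_cluster fccOut fccClusters fccCanonS fccCanonW
  dsimp only
  rw [show (PySem.Dict.empty : PySem.Dict Int (List Int)) = PySem.Dict.mk [] from rfl, houter]
  dsimp only
  rw [List.nil_append, List.nil_append,
    fcc_clusters_of_items (fccS assignA assignB) (PySem.List.pyRange 0 (assignA.length : Int) 1)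
      (PySem.List.nodup_pyRange_one 0 _) _ rfl]
  set CS := ((PySem.List.pyRange 0 (assignA.length : Int) 1).filter
      (fun i => !(fccS assignA assignB i).isEmpty)).map
      (fun i => i :: fccS assignA assignB i) with hCS
  by_cases hlen : (CS.length == 0) = true
  · rw [if_pos hlen, if_pos hlen]
    have hnil : CS = [] := List.eq_nil_of_length_eq_zero (by simpa using hlen)
    rw [hnil,
      fcc_clusters_of_items (fccW assignA assignB) (PySem.List.pyRange 0 (assignA.length : Int) 1)
        (PySem.List.nodup_pyRange_one 0 _) _ rfl]
  · rw [if_neg hlen, if_neg hlen]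


-- ===== B side =====

def fccKey (assignA : List String) (assignB : List Int) (i : Int) : String × Int :=
  (PySem.List.pyGetD assignA i "", PySem.List.pyGetD assignB i 0)

def fccMembers (assignA : List String) (assignB : List Int) (p : String × Int) : List Int :=
  (PySem.List.pyRange 0 (assignA.length : Int) 1).filter (fun i => fccKey assignA assignB i == p)

lemma fcc_key_beq (assignA : List String) (assignB : List Int) (x j : Int) :
    (fccKey assignA assignB j == fccKey assignA assignB x) = fccStrong assignA assignB x j := by
  simp only [fccKey, fccStrong]
  show ((PySem.List.pyGetD assignA j "" == PySem.List.pyGetD assignA x "") &&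
        (PySem.List.pyGetD assignB j 0 == PySem.List.pyGetD assignB x 0)) = _
  congr 1
  · exact Bool.beq_comm
  · exact Bool.beq_comm


lemma fcc_groups_getD (assignA : List String) (assignB : List Int) (p : String × Int) :
    ((PySem.List.pyRange 0 (assignA.length : Int) 1).foldl
        (fun (d : PySem.Dict (String × Int) (List Int)) i =>
          d.modify (PySem.List.pyGetD assignA i "", PySem.List.pyGetD assignB i 0) []
            (fun l => l ++ [i]))
        PySem.Dict.empty).getD p []
      = fccMembers assignA assignB p := by
  have h := PySem.Dict.getD_foldl_modify_append
      ((PySem.List.pyRange 0 (assignA.length : Int) 1).map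
        (fun i => ((PySem.List.pyGetD assignA i "", PySem.List.pyGetD assignB i 0), i)))
      (PySem.Dict.empty) p
  rw [List.foldl_map] at h
  simp only at h
  rw [h]
  simp [List.filter_map, List.map_map, fccMembers, fccKey, Function.comp_def]


lemma fcc_groups_values (assignA : List String) (assignB : List Int) :
    ((PySem.List.pyRange 0 (assignA.length : Int) 1).foldl
        (fun (d : PySem.Dict (String × Int) (List Int)) i =>
          d.modify (PySem.List.pyGetD assignA i "", PySem.List.pyGetD assignB i 0) []
            (fun l => l ++ [i]))
        PySem.Dict.empty).values
      = (PySem.Set.ofList ((PySem.List.pyRange 0 (assignA.length : Int) 1).map (fccKey assignA assignB))).map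
          (fccMembers assignA assignB) := by
  have hnd : ((PySem.List.pyRange 0 (assignA.length : Int) 1).foldl
      (fun (d : PySem.Dict (String × Int) (List Int)) i =>
        d.modify (PySem.List.pyGetD assignA i "", PySem.List.pyGetD assignB i 0) []
          (fun l => l ++ [i]))
      PySem.Dict.empty).keys.Nodup :=
    PySem.Dict.nodup_keys_foldl_modify_key _
      (fun i : Int => (PySem.List.pyGetD assignA i "", PySem.List.pyGetD assignB i 0))
      ([] : List Int) (fun _ i => fun l => l ++ [i]) PySem.Dict.empty (by simp)
  have hkeys := PySem.Dict.keys_foldl_modify_key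
      (PySem.List.pyRange 0 (assignA.length : Int) 1)
      (fun i : Int => (PySem.List.pyGetD assignA i "", PySem.List.pyGetD assignB i 0))
      ([] : List Int) (fun _ i => fun l => l ++ [i]) PySem.Dict.empty
  rw [PySem.Dict.values_eq_map_keys _ hnd ([] : List Int), hkeys]
  have hupd : PySem.Set.update (PySem.Dict.empty : PySem.Dict (String × Int) (List Int)).keys
        ((PySem.List.pyRange 0 (assignA.length : Int) 1).map
          (fun i : Int => (PySem.List.pyGetD assignA i "", PySem.List.pyGetD assignB i 0)))
      = PySem.Set.ofList ((PySem.List.pyRange 0 (assignA.length : Int) 1).map (fccKey assignA assignB)) := by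
    simp [PySem.Dict.keys]
    rfl
  rw [hupd]
  apply List.map_congr_left
  intro q _
  exact fcc_groups_getD assignA assignB q


lemma fcc_range_filter_chain (P : Int → Bool) (n : Int) :
    ∀ (k : Nat) (a : Int), (n - a).toNat ≤ k →
      ∀ (u : List Int) (x : Int) (v : List Int),
        (PySem.List.pyRange a n 1).filter P = u ++ x :: v →
        v = (PySem.List.pyRange (x+1) n 1).filter P := by
  intro k
  induction k with
  | zero =>
    intro a ha u x v h
    rw [PySem.List.pyRange_one_eq_nil (by omega)] at h
    simp at h
  | succ k ih =>
    intro a ha u x v h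
    by_cases hab : a < n
    · rw [PySem.List.pyRange_one_cons hab, List.filter_cons] at h
      by_cases hP : P a = true
      · rw [if_pos hP] at h
        cases u with
        | nil =>
          rw [List.nil_append] at h
          injection h with h1 h2
          rw [← h2, h1]
        | cons y u' =>
          rw [List.cons_append] at h
          injection h with h1 h2
          exact ih (a+1) (by omega) u' x v h2
      · rw [if_neg hP] at h
        exact ih (a+1) (by omega) u x v h
    · rw [PySem.List.pyRange_one_eq_nil (by omega)] at h
      simp at h


lemma fcc_suffixes_eq (S : Int → List Int) :
    ∀ (g : List Int), (∀ (u : List Int) (x : Int) (v : List Int), g = u ++ x :: v → S x = v) →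
      (List.range (g.length - 1)).map (fun k => g.drop k)
        = g.dropLast.map (fun x => x :: S x) := by
  intro g
  induction g with
  | nil => intro _; simp
  | cons x t ih =>
    intro h
    have hx : S x = t := h [] x t rfl
    have h' : ∀ (u : List Int) (x' : Int) (v : List Int), t = u ++ x' :: v → S x' = v :=
      fun u x' v hu => h (x :: u) x' v (by simp [hu])
    cases t with
    | nil => simp
    | cons y t' =>
      have hlen : (x :: y :: t').length - 1 = t'.length + 1 := by simp
      rw [hlen, List.range_succ_eq_map, List.map_cons, List.drop_zero, List.map_map]
      have hcomp : ((fun k => (x :: y :: t').drop k) ∘ Nat.succ) = fun k => (y :: t').drop k := by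
        funext k
        simp
      rw [hcomp]
      have hlen2 : t'.length = (y :: t').length - 1 := by simp
      rw [hlen2, ih h']
      conv_rhs => rw [List.dropLast_cons_of_ne_nil (by simp : (y :: t') ≠ []), List.map_cons]
      rw [hx]


lemma fcc_filter_dropLast (S : Int → List Int) :
    ∀ (g : List Int), (∀ (u : List Int) (x : Int) (v : List Int), g = u ++ x :: v → S x = v) →
      g.filter (fun x => !(S x).isEmpty) = g.dropLast := by
  intro g
  induction g with
  | nil => intro _; rfl
  | cons x t ih =>
    intro h
    have hx : S x = t := h [] x t rfl
    have h' : ∀ (u : List Int) (x' : Int) (v : List Int), t = u ++ x' :: v → S x' = v :=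
      fun u x' v hu => h (x :: u) x' v (by simp [hu])
    rw [List.filter_cons]
    cases t with
    | nil => simp [hx]
    | cons y t' =>
      have hcond : (!(S x).isEmpty) = true := by rw [hx]; rfl
      rw [if_pos hcond, ih h']
      conv_rhs => rw [List.dropLast_cons_of_ne_nil (by simp : (y :: t') ≠ [])]


lemma fcc_members_chain (assignA : List String) (assignB : List Int) (p : String × Int) :
    ∀ (u : List Int) (x : Int) (v : List Int),
      fccMembers assignA assignB p = u ++ x :: v → fccS assignA assignB x = v := by
  intro u x v hdec
  unfold fccMembers at hdec
  have hx : x ∈ (PySem.List.pyRange 0 (assignA.length : Int) 1).filter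
      (fun i => fccKey assignA assignB i == p) := by rw [hdec]; simp
  have hkey : (fccKey assignA assignB x == p) = true :=
    List.of_mem_filter (p := fun i => fccKey assignA assignB i == p) hx
  have hp : p = fccKey assignA assignB x := (eq_of_beq hkey).symm
  have hv := fcc_range_filter_chain (fun i => fccKey assignA assignB i == p)
      (assignA.length : Int) ((assignA.length : Int) - 0).toNat 0 le_rfl u x v hdec
  rw [hv]
  subst hp
  unfold fccS
  apply List.filter_congr
  intro j _
  exact (fcc_key_beq assignA assignB x j).symm


lemma fcc_sum_if_count (K : List (String × Int)) (y : String × Int) (c : Nat) :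
    (K.map (fun p => if y == p then c else 0)).sum = c * K.count y := by
  induction K with
  | nil => simp
  | cons q t ih =>
    simp only [List.map_cons, List.sum_cons, List.count_cons, ih]
    by_cases h : y = q
    · subst h
      simp
      ring
    · have h1 : (y == q) = false := beq_eq_false_iff_ne.mpr h
      have h2 : (q == y) = false := beq_eq_false_iff_ne.mpr (Ne.symm h)
      simp [h1, h2]


lemma fcc_count_flatMap (K : List (String × Int)) (f : (String × Int) → List Int) (x : Int) :
    (K.flatMap f).count x = (K.map (fun p => (f p).count x)).sum := by
  induction K with
  | nil => rfl
  | cons q t ih => simp [List.flatMap_cons, List.count_append, ih]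

lemma fcc_perm (key : Int → String × Int) (is : List Int) :
    ((PySem.Set.ofList (is.map key)).flatMap (fun p => is.filter (fun i => key i == p))).Perm is := by
  apply List.perm_iff_count.mpr
  intro x
  rw [fcc_count_flatMap]
  have hpt : ∀ p ∈ PySem.Set.ofList (is.map key),
      (is.filter (fun i => key i == p)).count x = if key x == p then is.count x else 0 := by
    intro p _
    by_cases hp : (key x == p) = true
    · rw [if_pos hp]
      exact List.count_filter hp
    · rw [if_neg hp]
      apply List.count_eq_zero.mpr
      intro hmem
      exact hp (List.of_mem_filter (p := fun i => key i == p) hmem)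
  rw [List.map_congr_left hpt, fcc_sum_if_count]
  by_cases hx : x ∈ is
  · rw [List.count_eq_one_of_mem (PySem.Set.nodup_ofList _)
      ((PySem.Set.mem_ofList _ _).mpr (List.mem_map_of_mem hx))]
    simp
  · rw [List.count_eq_zero.mpr hx]
    simp


lemma fcc_suffixes_pyRange (g : List Int) :
    (PySem.List.pyRange 0 ((g.length : Int) - 1) 1).map (fun k => PySem.List.slice g (some k) none)
      = (List.range (g.length - 1)).map (fun k => g.drop k) := by
  rw [PySem.List.pyRange_one, List.map_map]
  have hn : (((g.length : Int) - 1) - 0).toNat = g.length - 1 := by omega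
  rw [hn]
  apply List.map_congr_left
  intro k _
  show PySem.List.slice g (some ((0 : Int) + (k : Int))) none = g.drop k
  rw [zero_add]
  exact PySem.List.slice_from_natCast g k


lemma fcc_B_sorted (assignA : List String) (assignB : List Int) :
    PySem.List.sorted
        ((PySem.Set.ofList ((PySem.List.pyRange 0 (assignA.length : Int) 1).map (fccKey assignA assignB))).flatMap
          (fun p => (List.range ((fccMembers assignA assignB p).length - 1)).map
            (fun k => (fccMembers assignA assignB p).drop k)))
        (fun c => PySem.List.pyGetD c 0 0) false
      = fccCanonS assignA assignB := by
  apply PySem.List.sorted_eq_of_perm_of_pairwise_lt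
  · have hsuf : (fun p => (List.range ((fccMembers assignA assignB p).length - 1)).map
          (fun k => (fccMembers assignA assignB p).drop k))
        = (fun p => ((fccMembers assignA assignB p).filter
            (fun x => !(fccS assignA assignB x).isEmpty)).map
            (fun x => x :: fccS assignA assignB x)) := by
      funext p
      rw [fcc_suffixes_eq _ _ (fcc_members_chain assignA assignB p),
        fcc_filter_dropLast _ _ (fcc_members_chain assignA assignB p)]
    rw [hsuf, ← List.map_flatMap, ← List.filter_flatMap]
    unfold fccCanonS
    apply List.Perm.map
    apply List.Perm.filter
    have hperm := fcc_perm (fccKey assignA assignB) (PySem.List.pyRange 0 (assignA.length : Int) 1)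
    unfold fccMembers
    exact hperm.symm
  · unfold fccCanonS
    rw [List.pairwise_map]
    refine List.Pairwise.imp ?_
      ((PySem.List.pairwise_lt_pyRange_one 0 ((assignA.length : Int))).filter _)
    intro a b hab
    simpa [PySem.List.pyGetD_zero_cons] using hab


lemma fcc_B_eq (assignA : List String) (assignB : List Int) :
    find_common_cluster_alt assignA assignB = fccOut assignA assignB := by
  unfold find_common_cluster_alt fccOut fccClusters fccCanonS fccCanonW
  dsimp only
  rw [fcc_groups_values assignA assignB]
  have hbody : (fun (acc : List (List Int)) (g : List Int) =>
        (PySem.List.pyRange 0 ((g.length : Int) - 1) 1).foldl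
          (fun acc k => acc ++ [PySem.List.slice g (some k) none]) acc)
      = (fun acc g => acc ++ (List.range (g.length - 1)).map (fun k => g.drop k)) := by
    funext acc g
    rw [PySem.List.foldl_append_singleton_eq_map, fcc_suffixes_pyRange]
  rw [hbody, PySem.List.foldl_append_eq_flatMap, List.nil_append, List.flatMap_map,
    fcc_B_sorted assignA assignB]
  unfold fccCanonS
  set CS := ((PySem.List.pyRange 0 (assignA.length : Int) 1).filter
      (fun i => !(fccS assignA assignB i).isEmpty)).map
      (fun i => i :: fccS assignA assignB i) with hCS
  have htail : ∀ i : Int, ((PySem.List.pyRange (i+1) (assignA.length : Int) 1).filter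
        (fun j => ((PySem.List.pyGetD assignA j "" == PySem.List.pyGetD assignA i "")
                   != (PySem.List.pyGetD assignB j 0 == PySem.List.pyGetD assignB i 0))))
      = fccW assignA assignB i := by
    intro i
    unfold fccW
    apply List.filter_congr
    intro j _
    unfold fccWeak
    congr 1
    · exact Bool.beq_comm
    · exact Bool.beq_comm
  by_cases hlen : (CS.length == 0) = true
  · rw [if_pos hlen, if_pos hlen]
    have hwbody : (fun (acc : List (List Int)) (i : Int) =>
          if ((PySem.List.pyRange (i+1) (assignA.length : Int) 1).filter
            (fun j => ((PySem.List.pyGetD assignA j "" == PySem.List.pyGetD assignA i "")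
                       != (PySem.List.pyGetD assignB j 0 == PySem.List.pyGetD assignB i 0)))).isEmpty
          then acc
          else acc ++ [i :: (PySem.List.pyRange (i+1) (assignA.length : Int) 1).filter
            (fun j => ((PySem.List.pyGetD assignA j "" == PySem.List.pyGetD assignA i "")
                       != (PySem.List.pyGetD assignB j 0 == PySem.List.pyGetD assignB i 0)))])
        = (fun acc i => if (!(fccW assignA assignB i).isEmpty) = true
            then acc ++ [i :: fccW assignA assignB i] else acc) := by
      funext acc i
      rw [htail i]
      cases hw : (fccW assignA assignB i).isEmpty <;> simp
    have hnil : CS = [] := List.eq_nil_of_length_eq_zero (by simpa using hlen)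
    rw [hwbody, hnil, PySem.List.foldl_append_if
      (fun i => !(fccW assignA assignB i).isEmpty)
      (fun i => i :: fccW assignA assignB i), List.nil_append]
  · rw [if_neg hlen, if_neg hlen]


-- ===== VERDICT (by name: the statement is the Claim_ definition above) =====
theorem find_common_cluster_spec : Claim_equal_find_common_cluster := by
  intro assignA assignB _hdom _hpre
  unfold Spec_find_common_cluster
  rw [fcc_A_eq, fcc_B_eq]
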